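-- pv_equiv track=rewrite | github.com/enaa99/Algorithm | baekjoonPython/1065.py | Count
-- ===== SOURCE A (Python) =====
-- def Count(n):
--     cnt = 99
--
--     if n < 100:
--         return n
--
--     for i in range(100,n+1):
--         a = int(i/100)
--         b = int(i%100/10)
--         c = i%10
--
--         if (a-b) == (b-c):
--             cnt+=1
--
--
--     return cnt
-- ===== SOURCE B (Python) =====
-- def Count(n):
--     # A handsome number >= 100 has digits (a, b, c) with a - b == b - c where
--     # a is everything above the last two digits; that forces a = 2*b - c <= 18.
--     # Enumerate the (at most 190) candidates directly instead of scanning 100..n.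
--     if n < 100:
--         return n
--     cnt = 99
--     for a in range(1, 19):
--         for b in range(10):
--             c = 2 * b - a
--             if 0 <= c <= 9 and 100 * a + 10 * b + c <= n:
--                 cnt += 1
--     return cnt
-- ===== Notes on version B (the rewrite author's own statement) =====
-- stated objective: faster
-- what changed: Instead of scanning every i in [100, n] and testing its digits, B enumerates the at most 190 candidate digit patterns (a, b) with 1 <= a <= 18 (the arithmetic condition forces the leading part a = 2b - c <= 18) and counts those whose value is <= n, turning an O(n) scan into an O(1) computation.
import Mathlib
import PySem

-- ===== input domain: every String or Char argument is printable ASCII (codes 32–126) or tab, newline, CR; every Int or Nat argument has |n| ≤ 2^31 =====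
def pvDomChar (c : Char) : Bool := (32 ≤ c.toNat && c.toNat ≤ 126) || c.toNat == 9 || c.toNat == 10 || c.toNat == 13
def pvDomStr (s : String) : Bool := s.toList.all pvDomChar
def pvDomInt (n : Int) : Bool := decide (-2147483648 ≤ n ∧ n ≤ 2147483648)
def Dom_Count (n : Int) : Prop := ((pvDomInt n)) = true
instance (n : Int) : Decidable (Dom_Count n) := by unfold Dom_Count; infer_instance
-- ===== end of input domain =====

-- B replaces A's scan of every i in [100, n] by enumerating the ≤ 190 candidate
-- digit triples (a = 2b - c forces 1 ≤ a ≤ 18), an O(1) computation.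

-- ===== PORT A =====
def Count (n : Int) : Int :=
  let cnt : Int := 99
  if n < 100 then n
  else
    -- int(i/100) and int(i%100/10) are truncating division (exact in float for |i| ≤ 2^31 + 1)
    (PySem.List.pyRange 100 (n + 1) 1).foldl (fun cnt i =>
      let a := PySem.Int.truncdiv i 100
      let b := PySem.Int.truncdiv (PySem.Int.mod i 100) 10
      let c := PySem.Int.mod i 10
      if a - b = b - c then cnt + 1 else cnt) cnt

-- ===== PORT B =====
def Count_alt (n : Int) : Int :=
  if n < 100 then n
  else
    (PySem.List.pyRange 1 19 1).foldl (fun cnt a =>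
      (PySem.List.pyRange 0 10 1).foldl (fun cnt b =>
        let c := 2 * b - a
        if 0 ≤ c ∧ c ≤ 9 ∧ 100 * a + 10 * b + c ≤ n then cnt + 1 else cnt) cnt) 99

-- ===== PRECONDITION & SPEC =====
def Spec_Count (n : Int) (out : Int) : Prop := out = Count_alt n
instance (n : Int) (out : Int) : Decidable (Spec_Count n out) := by unfold Spec_Count; infer_instance

-- ===== CLAIM (what is proved, stated in full; the proofs are below) =====
def Claim_equal_Count : Prop := ∀ (n : Int), Dom_Count n → Spec_Count n (Count n)

-- ===== LEMMAS AND PROOFS =====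

-- the digit test of port A, as a Bool predicate on i
def pvTestA (i : Int) : Bool :=
  decide (PySem.Int.truncdiv i 100 - PySem.Int.truncdiv (PySem.Int.mod i 100) 10
    = PySem.Int.truncdiv (PySem.Int.mod i 100) 10 - PySem.Int.mod i 10)

-- the candidate test of port B, as a Bool predicate on (a, b)
def pvTestB (n a b : Int) : Bool :=
  decide (0 ≤ 2 * b - a ∧ 2 * b - a ≤ 9 ∧ 100 * a + 10 * b + (2 * b - a) ≤ n)

-- splitting Ico at its right end
lemma ico_snoc (a m : Int) (h : a ≤ m) :
    Finset.Ico a (m + 1) = insert m (Finset.Ico a m) := by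
  ext x; simp only [Finset.mem_Ico, Finset.mem_insert]; omega

-- a countP over a consecutive range is a Finset card
lemma countP_pyRange_aux (p : Int → Bool) (a : Int) (k : Nat) :
    (PySem.List.pyRange a (a + k) 1).countP p
      = ((Finset.Ico a (a + (k : Int))).filter (fun i => p i = true)).card := by
  induction k with
  | zero => simp [PySem.List.pyRange_one_eq_nil (le_refl a)]
  | succ k ih =>
    have hb : a + ((k + 1 : Nat) : Int) = (a + (k : Int)) + 1 := by push_cast; ring
    rw [hb, PySem.List.pyRange_one_succ_right (by omega), List.countP_append, ih,
        ico_snoc a (a + (k : Int)) (by omega), Finset.filter_insert]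
    by_cases hp : p (a + (k : Int)) = true
    · rw [if_pos hp, Finset.card_insert_of_notMem (by simp)]
      simp [hp]
    · simp [hp]

lemma countP_pyRange (p : Int → Bool) (a b : Int) (h : a ≤ b) :
    (PySem.List.pyRange a b 1).countP p
      = ((Finset.Ico a b).filter (fun i => p i = true)).card := by
  have hb : b = a + ((b - a).toNat : Int) := by omega
  rw [hb, countP_pyRange_aux]

-- a sum over a consecutive range is a Finset sum
lemma sum_map_pyRange_aux (g : Int → Int) (a : Int) (k : Nat) :
    ((PySem.List.pyRange a (a + k) 1).map g).sum = ∑ i ∈ Finset.Ico a (a + (k : Int)), g i := by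
  induction k with
  | zero => simp [PySem.List.pyRange_one_eq_nil (le_refl a)]
  | succ k ih =>
    have hb : a + ((k + 1 : Nat) : Int) = (a + (k : Int)) + 1 := by push_cast; ring
    rw [hb, PySem.List.pyRange_one_succ_right (by omega), List.map_append, List.sum_append, ih,
        ico_snoc a (a + (k : Int)) (by omega), Finset.sum_insert (by simp)]
    simp [add_comm]

lemma sum_map_pyRange (g : Int → Int) (a b : Int) (h : a ≤ b) :
    ((PySem.List.pyRange a b 1).map g).sum = ∑ i ∈ Finset.Ico a b, g i := by
  have hb : b = a + ((b - a).toNat : Int) := by omega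
  rw [hb, sum_map_pyRange_aux]

-- port A's loop counts the handsome numbers in [100, n]
lemma countA (n : Int) (h : ¬ n < 100) :
    Count n = 99 + (((Finset.Ico (100 : Int) (n + 1)).filter (fun i => pvTestA i = true)).card : Int) := by
  rw [Count]
  simp only [if_neg h]
  rw [show (fun (cnt i : Int) =>
        let a := PySem.Int.truncdiv i 100
        let b := PySem.Int.truncdiv (PySem.Int.mod i 100) 10
        let c := PySem.Int.mod i 10
        if a - b = b - c then cnt + 1 else cnt)
      = (fun (cnt i : Int) => if pvTestA i then cnt + 1 else cnt) from
    funext fun cnt => funext fun i => by simp [pvTestA]]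
  rw [PySem.List.foldl_if_add_one, countP_pyRange pvTestA 100 (n + 1) (by omega)]

-- port B's loops count the valid (a, b) candidate pairs
lemma countB (n : Int) (h : ¬ n < 100) :
    Count_alt n = 99 + ∑ a ∈ Finset.Ico (1 : Int) 19,
      (((Finset.Ico (0 : Int) 10).filter (fun b => pvTestB n a b = true)).card : Int) := by
  rw [Count_alt, if_neg h]
  have hinner : ∀ (cnt a : Int),
      (PySem.List.pyRange 0 10 1).foldl (fun cnt b =>
        let c := 2 * b - a
        if 0 ≤ c ∧ c ≤ 9 ∧ 100 * a + 10 * b + c ≤ n then cnt + 1 else cnt) cnt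
      = cnt + (((Finset.Ico (0 : Int) 10).filter (fun b => pvTestB n a b = true)).card : Int) := by
    intro cnt a
    rw [show (fun (cnt b : Int) =>
          let c := 2 * b - a
          if 0 ≤ c ∧ c ≤ 9 ∧ 100 * a + 10 * b + c ≤ n then cnt + 1 else cnt)
        = (fun (cnt b : Int) => if pvTestB n a b then cnt + 1 else cnt) from
      funext fun cnt => funext fun b => by simp [pvTestB]]
    rw [PySem.List.foldl_if_add_one (pvTestB n a), countP_pyRange (pvTestB n a) 0 10 (by omega)]
  rw [show (fun (cnt a : Int) =>
        (PySem.List.pyRange 0 10 1).foldl (fun cnt b =>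
          let c := 2 * b - a
          if 0 ≤ c ∧ c ≤ 9 ∧ 100 * a + 10 * b + c ≤ n then cnt + 1 else cnt) cnt)
      = (fun (cnt a : Int) =>
        cnt + (((Finset.Ico (0 : Int) 10).filter (fun b => pvTestB n a b = true)).card : Int)) from
    funext fun cnt => funext fun a => hinner cnt a]
  rw [PySem.List.foldl_add, sum_map_pyRange _ 1 19 (by omega)]

-- on nonnegative i the truncating/Python operations are Lean's `/` and `%`
lemma testA_unfold (i : Int) (hi : 0 ≤ i) :
    pvTestA i = true ↔ i / 100 - (i % 100) / 10 = (i % 100) / 10 - i % 10 := by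
  have h1 : PySem.Int.truncdiv i 100 = i / 100 := Int.tdiv_eq_ediv_of_nonneg hi
  have h2 : PySem.Int.mod i 100 = i % 100 := PySem.Int.mod_eq_emod_of_pos (by omega)
  have h3 : PySem.Int.mod i 10 = i % 10 := PySem.Int.mod_eq_emod_of_pos (by omega)
  have h4 : PySem.Int.truncdiv (i % 100) 10 = (i % 100) / 10 :=
    Int.tdiv_eq_ediv_of_nonneg (Int.emod_nonneg i (by omega))
  rw [pvTestA, h2, h1, h3, h4, decide_eq_true_iff]

-- the digit test at an explicitly decomposed i = 100a + 10b + c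
lemma testA_digits (i a b c : Int) (ha : 1 ≤ a) (hb : 0 ≤ b ∧ b ≤ 9) (hc : 0 ≤ c ∧ c ≤ 9)
    (hi : i = 100 * a + 10 * b + c) : (pvTestA i = true ↔ a - b = b - c) := by
  rw [testA_unfold i (by omega)]
  have e1 : i / 100 = a := by omega
  have e2 : i % 100 = 10 * b + c := by omega
  have e3 : i % 10 = c := by omega
  rw [e1, e2, e3]
  have e4 : (10 * b + c) / 10 = b := by omega
  rw [e4]

-- the combinatorial heart: both sides count the same set of handsome numbers
lemma key (n : Int) :
    ((Finset.Ico (100 : Int) (n + 1)).filter (fun i => pvTestA i = true)).card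
      = ∑ a ∈ Finset.Ico (1 : Int) 19,
          ((Finset.Ico (0 : Int) 10).filter (fun b => pvTestB n a b = true)).card := by
  have himg : ∀ a ∈ Finset.Ico (1 : Int) 19,
      ((Finset.Ico (0 : Int) 10).filter (fun b => pvTestB n a b = true)).card
        = (((Finset.Ico (0 : Int) 10).filter (fun b => pvTestB n a b = true)).image
            (fun b => 100 * a + 10 * b + (2 * b - a))).card := by
    intro a _
    rw [Finset.card_image_of_injOn]
    intro x _ y _ hxy
    simp only [] at hxy
    omega
  have hdisj : ∀ a ∈ Finset.Ico (1 : Int) 19, ∀ a' ∈ Finset.Ico (1 : Int) 19, a ≠ a' →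
      Disjoint (((Finset.Ico (0 : Int) 10).filter (fun b => pvTestB n a b = true)).image
          (fun b => 100 * a + 10 * b + (2 * b - a)))
        (((Finset.Ico (0 : Int) 10).filter (fun b => pvTestB n a' b = true)).image
          (fun b => 100 * a' + 10 * b + (2 * b - a'))) := by
    intro a ha a' ha' hne
    simp only [Finset.disjoint_left, Finset.mem_image, Finset.mem_filter, Finset.mem_Ico]
    rintro i ⟨b, ⟨⟨hb, hq⟩, rfl⟩⟩ ⟨b', ⟨hb', hq'⟩, he⟩
    simp only [pvTestB, decide_eq_true_eq] at hq hq'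
    apply hne
    omega
  rw [Finset.sum_congr rfl himg, ← Finset.card_biUnion hdisj]
  congr 1
  apply Finset.ext
  intro i
  simp only [Finset.mem_biUnion, Finset.mem_filter, Finset.mem_image, Finset.mem_Ico]
  constructor
  · rintro ⟨⟨h100, hn1⟩, hp⟩
    obtain ⟨q, r, hqr, hr0, hr100⟩ : ∃ q r, i = 100 * q + r ∧ 0 ≤ r ∧ r < 100 :=
      ⟨i / 100, i % 100, by omega, by omega, by omega⟩
    obtain ⟨b, c, hbc, hb0, hb9, hc0, hc9⟩ :
        ∃ b c, r = 10 * b + c ∧ 0 ≤ b ∧ b ≤ 9 ∧ 0 ≤ c ∧ c ≤ 9 :=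
      ⟨r / 10, r % 10, by omega, by omega, by omega, by omega, by omega⟩
    rw [testA_digits i q b c (by omega) ⟨hb0, hb9⟩ ⟨hc0, hc9⟩ (by omega)] at hp
    refine ⟨q, by omega, b, ⟨by omega, ?_⟩, by omega⟩
    simp only [pvTestB, decide_eq_true_eq]
    omega
  · rintro ⟨a, ha, b, ⟨hb, hq⟩, hi⟩
    simp only [pvTestB, decide_eq_true_eq] at hq
    refine ⟨⟨by omega, by omega⟩, ?_⟩
    rw [testA_digits i a b (2 * b - a) (by omega) (by omega) (by omega) (by omega)]
    omega

-- ===== VERDICT (by name: the statement is the Claim_ definition above) =====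
theorem Count_spec : Claim_equal_Count := by
  intro n _
  unfold Spec_Count
  by_cases h : n < 100
  · rw [Count, Count_alt]; simp [h]
  · rw [countA n h, countB n h, key n]
    push_cast
    ring
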